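-- pv_equiv track=rewrite | github.com/muggl3mind/career-manager | evals/scripts/runtime_verify.py | check_duplicate_companies
-- ===== SOURCE A (Python) =====
-- def check_duplicate_companies(target_rows: list[dict]) -> list[dict]:
--     """Check for unintentional duplicate company entries."""
--     checks = []
--     seen = {}
--     dupes = []
--     for r in target_rows:
--         name = (r.get('company') or '').strip().lower()
--         if not name:
--             continue
--         if name in seen:
--             dupes.append(name)
--         else:
--             seen[name] = 0
--         seen[name] += 1
--
--     dupe_set = set(dupes)
--     if dupe_set:
--         examples = sorted(dupe_set)[:5]
--         checks.append({
--             'check': 'duplicate_companies',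
--             'status': 'warn',
--             'detail': f'{len(dupe_set)} companies appear multiple times: ' + ', '.join(examples),
--         })
--     else:
--         checks.append({
--             'check': 'duplicate_companies',
--             'status': 'pass',
--             'detail': f'{len(seen)} unique companies, no duplicates',
--         })
--     return checks
-- ===== SOURCE B (Python) =====
-- def check_duplicate_companies(target_rows: list[dict]) -> list[dict]:
--     """Check for unintentional duplicate company entries (sort-then-adjacent-scan)."""
--     names = sorted(n for n in ((r.get('company') or '').strip().lower() for r in target_rows) if n)
--     distinct = 0
--     dupes = []
--     prev = None
--     prev2 = None
--     for n in names:
--         if n != prev: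
--             distinct += 1
--         elif n != prev2:
--             dupes.append(n)
--         prev2 = prev
--         prev = n
--     if dupes:
--         examples = dupes[:5]
--         return [{
--             'check': 'duplicate_companies',
--             'status': 'warn',
--             'detail': f'{len(dupes)} companies appear multiple times: ' + ', '.join(examples),
--         }]
--     return [{
--         'check': 'duplicate_companies',
--         'status': 'pass',
--         'detail': f'{distinct} unique companies, no duplicates',
--     }]
-- ===== Notes on version B (the rewrite author's own statement) =====
-- stated objective: alternative
-- what changed: B replaces A's inline dict-membership bookkeeping by sort-then-adjacent-scan: it sorts the normalized non-empty names once and then a single scan comparing each name with its two predecessors yields the distinct count and the duplicate examples already in sorted order, so no dict or set is built at all.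
import Mathlib
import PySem

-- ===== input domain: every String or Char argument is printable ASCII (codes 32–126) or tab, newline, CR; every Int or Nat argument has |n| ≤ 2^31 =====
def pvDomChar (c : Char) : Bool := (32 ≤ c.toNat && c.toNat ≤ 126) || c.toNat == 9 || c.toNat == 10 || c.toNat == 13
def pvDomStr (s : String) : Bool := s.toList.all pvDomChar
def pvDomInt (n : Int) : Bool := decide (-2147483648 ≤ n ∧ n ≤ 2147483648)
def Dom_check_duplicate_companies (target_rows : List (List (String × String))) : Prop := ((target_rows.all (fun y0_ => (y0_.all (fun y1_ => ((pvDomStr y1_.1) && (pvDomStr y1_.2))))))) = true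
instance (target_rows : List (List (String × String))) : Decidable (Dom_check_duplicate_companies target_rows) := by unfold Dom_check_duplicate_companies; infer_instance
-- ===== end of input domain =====

-- B replaces A's inline seen-membership/dupes-append dict loop by sort-then-adjacent-scan:
-- sort the normalized names once, then one scan comparing each name with its two predecessors;
-- same results, no speed claim.

-- ===== PORT A =====
-- (r.get('company') or '').strip().lower(); 'or ""' = getD "" since "" is the only falsy str
def pvNorm (r : List (String × String)) : String :=
  PySem.Str.lower (PySem.Str.strip (((PySem.Dict.mk r).get? "company").getD ""))

def check_duplicate_companies (target_rows : List (List (String × String))) : List (List (String × String)) :=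
  let st := target_rows.foldl
    (fun (st : PySem.Dict String Int × List String) r =>
      let name := pvNorm r
      if name = "" then st
      else if st.1.contains name then ((st.1).modify name 0 (· + 1), st.2 ++ [name])
      else ((st.1.insert name 0).modify name 0 (· + 1), st.2))
    (PySem.Dict.empty, [])
  let seen := st.1
  let dupe_set : PySem.Set String := PySem.Set.ofList st.2
  if dupe_set ≠ [] then
    let examples := PySem.List.slice (PySem.List.sorted dupe_set (fun x => x) false) none (some 5)
    [[("check", "duplicate_companies"), ("status", "warn"),
      ("detail", PySem.Int.toStr (dupe_set.length : Int) ++ " companies appear multiple times: " ++ PySem.Str.join ", " examples)]]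
  else
    [[("check", "duplicate_companies"), ("status", "pass"),
      ("detail", PySem.Int.toStr (seen.size : Int) ++ " unique companies, no duplicates")]]

-- ===== PORT B =====
-- sorted normalized non-empty names, then one adjacent scan with prev/prev2 (None -> Option)
def check_duplicate_companies_alt (target_rows : List (List (String × String))) : List (List (String × String)) :=
  let names := PySem.List.sorted ((target_rows.map pvNorm).filter (fun n => n ≠ "")) (fun x => x) false
  let st := names.foldl
    (fun (st : Int × List String × Option String × Option String) n =>
      if some n ≠ st.2.2.1 then (st.1 + 1, st.2.1, some n, st.2.2.1)
      else if some n ≠ st.2.2.2 then (st.1, st.2.1 ++ [n], some n, st.2.2.1)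
      else (st.1, st.2.1, some n, st.2.2.1))
    (0, [], none, none)
  let dupes := st.2.1
  if dupes ≠ [] then
    let examples := PySem.List.slice dupes none (some 5)
    [[("check", "duplicate_companies"), ("status", "warn"),
      ("detail", PySem.Int.toStr (dupes.length : Int) ++ " companies appear multiple times: " ++ PySem.Str.join ", " examples)]]
  else
    [[("check", "duplicate_companies"), ("status", "pass"),
      ("detail", PySem.Int.toStr st.1 ++ " unique companies, no duplicates")]]

-- ===== PRECONDITION & SPEC =====
def Spec_check_duplicate_companies (target_rows : List (List (String × String))) (out : List (List (String × String))) : Prop := out = check_duplicate_companies_alt target_rows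
instance (target_rows : List (List (String × String))) (out : List (List (String × String))) : Decidable (Spec_check_duplicate_companies target_rows out) := by unfold Spec_check_duplicate_companies; infer_instance

-- ===== CLAIM (what is proved, stated in full; the proofs are below) =====
def Claim_equal_check_duplicate_companies : Prop := ∀ (target_rows : List (List (String × String))), Dom_check_duplicate_companies target_rows → Spec_check_duplicate_companies target_rows (check_duplicate_companies target_rows)

-- ===== LEMMAS AND PROOFS =====

-- A's loop body on one non-empty normalized name
def pvStepA (st : PySem.Dict String Int × List String) (name : String) : PySem.Dict String Int × List String :=
  if st.1.contains name then ((st.1).modify name 0 (· + 1), st.2 ++ [name])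
  else ((st.1.insert name 0).modify name 0 (· + 1), st.2)

-- A's row loop is pvStepA folded over the filtered normalized names
theorem afold_eq_names (target_rows : List (List (String × String))) :
    target_rows.foldl
      (fun (st : PySem.Dict String Int × List String) r =>
        if pvNorm r = "" then st
        else if st.1.contains (pvNorm r) then ((st.1).modify (pvNorm r) 0 (· + 1), st.2 ++ [pvNorm r])
        else ((st.1.insert (pvNorm r) 0).modify (pvNorm r) 0 (· + 1), st.2))
      (PySem.Dict.empty, [])
    = ((target_rows.map pvNorm).filter (fun n => n ≠ "")).foldl pvStepA (PySem.Dict.empty, []) := by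
  rw [← PySem.List.foldl_ite_eq_foldl_filter (p := fun n => n ≠ "") pvStepA, List.foldl_map]
  apply PySem.List.foldl_congr_mem
  intro acc x _
  by_cases h : pvNorm x = "" <;> simp [pvStepA, h]

-- inserting 0 then incrementing at a fresh key is the counter step
theorem insert_modify_fresh (d : PySem.Dict String Int) (k : String) (h : d.contains k = false) :
    (d.insert k 0).modify k 0 (· + 1) = d.modify k 0 (· + 1) := by
  simp [PySem.Dict.modify, PySem.Dict.insert_insert_self, PySem.Dict.getD_insert_self,
    PySem.Dict.getD_of_not_contains d 0 h]

theorem pvStepA_pos (st : PySem.Dict String Int × List String) (m : String)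
    (h : st.1.contains m = true) :
    pvStepA st m = ((st.1).modify m 0 (· + 1), st.2 ++ [m]) := by simp [pvStepA, h]

theorem pvStepA_neg (st : PySem.Dict String Int × List String) (m : String)
    (h : st.1.contains m = false) :
    pvStepA st m = ((st.1.insert m 0).modify m 0 (· + 1), st.2) := by simp [pvStepA, h]

-- loop invariant: seen is the counter; dupes holds exactly the names seen at least twice
theorem afold_inv (l : List String) :
    (l.foldl pvStepA (PySem.Dict.empty, [])).1 = PySem.Dict.counter l
    ∧ ∀ x, x ∈ (l.foldl pvStepA (PySem.Dict.empty, ([] : List String))).2 ↔ 2 ≤ l.count x := by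
  induction l using List.reverseRecOn with
  | nil => exact ⟨rfl, by simp⟩
  | append_singleton l n ih =>
    obtain ⟨ih1, ih2⟩ := ih
    have hc : (List.foldl pvStepA (PySem.Dict.empty, []) l).1.contains n = l.contains n := by
      rw [ih1, PySem.Dict.contains_counter]
    rw [List.foldl_append]
    simp only [List.foldl_cons, List.foldl_nil]
    by_cases h : l.contains n = true
    · have hn : 0 < l.count n := List.count_pos_iff.mpr (by simpa using h)
      rw [pvStepA_pos _ _ (hc.trans h)]
      refine ⟨by simp [PySem.Dict.counter_append_singleton, ih1], ?_⟩
      intro x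
      simp only [List.mem_append, List.mem_singleton, ih2 x,
        List.count_append, List.count_singleton, beq_iff_eq]
      by_cases hx : x = n
      · subst hx
        constructor
        · intro _
          have h1 : (if x = x then 1 else 0) = 1 := if_pos rfl
          omega
        · intro _; exact Or.inr rfl
      · have hxn : ¬ (n = x) := fun hh => hx hh.symm
        simp [hxn, hx]
    · have h' : l.contains n = false := by simpa using h
      have hn : l.count n = 0 := List.count_eq_zero.mpr (by simpa using h')
      rw [pvStepA_neg _ _ (hc.trans h')]
      constructor
      · simp only []
        rw [PySem.Dict.counter_append_singleton, ← ih1,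
          insert_modify_fresh _ _ (hc.trans h')]
      · intro x
        simp only [ih2 x, List.count_append, List.count_singleton, beq_iff_eq]
        by_cases hx : x = n
        · subst hx; simp [hn]
        · have hxn : ¬ (n = x) := fun hh => hx hh.symm
          simp [hxn]

-- the two duplicate lists are permutations of each other
theorem dupes_perm (l : List String) :
    (PySem.Set.ofList (l.foldl pvStepA (PySem.Dict.empty, ([] : List String))).2).Perm
      ((PySem.Set.ofList l).filter (fun k => decide (2 ≤ l.count k))) := by
  obtain ⟨-, h2⟩ := afold_inv l
  rw [List.perm_ext_iff_of_nodup (PySem.Set.nodup_ofList _) ((PySem.Set.nodup_ofList l).filter _)]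
  intro x
  rw [PySem.Set.mem_ofList, h2, List.mem_filter, PySem.Set.mem_ofList]
  simp only [decide_eq_true_eq]
  constructor
  · intro h; exact ⟨List.count_pos_iff.mp (by omega), h⟩
  · exact fun h => h.2

-- ============== B-side lemmas: the adjacent scan on a sorted list ==============

-- in a ≤-sorted list the last element is maximal
theorem pairwise_le_getLast (l : List String) (h : l.Pairwise (· ≤ ·)) (m : String)
    (hm : l.getLast? = some m) : ∀ x ∈ l, x ≤ m := by
  induction l using List.reverseRecOn with
  | nil => simp at hm
  | append_singleton l a _ =>
    have ha : a = m := by simpa using hm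
    intro x hx
    rcases List.mem_append.mp hx with hx | hx
    · exact ha ▸ (List.pairwise_append.mp h).2.2 x hx a (by simp)
    · rw [List.mem_singleton.mp hx]; exact ha.le

-- the ordered set of a ≤-sorted list is <-sorted
theorem ofList_pairwise_lt (l : List String) (h : l.Pairwise (· ≤ ·)) :
    (PySem.Set.ofList l).Pairwise (· < ·) := by
  induction l using List.reverseRecOn with
  | nil => simp [PySem.Set.ofList_nil]
  | append_singleton l n ih =>
    rw [PySem.Set.ofList_append_singleton]
    have hl : l.Pairwise (· ≤ ·) := (List.pairwise_append.mp h).1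
    have hle : ∀ x ∈ l, x ≤ n := fun x hx => (List.pairwise_append.mp h).2.2 x hx n (by simp)
    unfold PySem.Set.add
    split_ifs with hc
    · exact ih hl
    · rw [List.pairwise_append]
      refine ⟨ih hl, by simp, ?_⟩
      intro a ha b hb
      simp at hb; subst hb
      have ham : a ∈ l := (PySem.Set.mem_ofList _ _).mp ha
      have : a ≠ b := by
        intro hab; subst hab
        exact hc (by simpa [PySem.Set.contains_iff (PySem.Set.ofList l) a] using ha)
      exact lt_of_le_of_ne (hle a ham) this

-- a <-sorted list containing an upper bound n ends with n
theorem lt_sorted_ends (S : List String) (h : S.Pairwise (· < ·)) (n : String)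
    (hn : n ∈ S) (hub : ∀ x ∈ S, x ≤ n) : ∃ S', S = S' ++ [n] ∧ n ∉ S' := by
  induction S using List.reverseRecOn with
  | nil => simp at hn
  | append_singleton S a _ =>
    have hlt : ∀ x ∈ S, x < a := fun x hx => (List.pairwise_append.mp h).2.2 x hx a (by simp)
    have han : a = n := by
      rcases List.mem_append.mp hn with hx | hx
      · exact absurd (hub a (by simp)) (not_le.mpr (hlt n hx))
      · exact (List.mem_singleton.mp hx).symm
    subst han
    exact ⟨S, rfl, fun hmem => lt_irrefl a (hlt a hmem)⟩

-- B's scan step (named only for the proofs; the port inlines it literally)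
def pvStepB (st : Int × List String × Option String × Option String) (n : String) :
    Int × List String × Option String × Option String :=
  if some n ≠ st.2.2.1 then (st.1 + 1, st.2.1, some n, st.2.2.1)
  else if some n ≠ st.2.2.2 then (st.1, st.2.1 ++ [n], some n, st.2.2.1)
  else (st.1, st.2.1, some n, st.2.2.1)

-- invariant of the adjacent scan over a ≤-sorted list
theorem scanB_inv (l : List String) (h : l.Pairwise (· ≤ ·)) :
    l.foldl pvStepB (0, [], none, none)
    = (((PySem.Set.ofList l).length : Int),
       (PySem.Set.ofList l).filter (fun k => decide (2 ≤ l.count k)),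
       l.getLast?, l.dropLast.getLast?) := by
  induction l using List.reverseRecOn with
  | nil => simp [PySem.Set.ofList_nil]
  | append_singleton l n ih =>
    have hl : l.Pairwise (· ≤ ·) := (List.pairwise_append.mp h).1
    have hle : ∀ x ∈ l, x ≤ n := fun x hx => (List.pairwise_append.mp h).2.2 x hx n (by simp)
    rw [List.foldl_append, List.foldl_cons, List.foldl_nil, ih hl]
    have hglast : (l ++ [n]).getLast? = some n := by simp
    have hdrop : (l ++ [n]).dropLast = l := by simp
    by_cases hprev : l.getLast? = some n
    · -- n repeats the previous maximal element, so n ∈ l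
      have hne : l ≠ [] := by intro hl0; subst hl0; simp at hprev
      have hlast : l.getLast hne = n := by
        have := List.getLast?_eq_some_getLast (l := l) hne
        rw [this] at hprev; exact Option.some.inj hprev
      have hdecomp : l = l.dropLast ++ [n] := by
        conv_lhs => rw [← List.dropLast_concat_getLast hne]
        rw [hlast]
      have hmem : n ∈ l := by rw [hdecomp]; simp
      have hset : PySem.Set.ofList (l ++ [n]) = PySem.Set.ofList l := by
        rw [PySem.Set.ofList_append_singleton]
        unfold PySem.Set.add
        rw [if_pos (by simpa [PySem.Set.contains_iff] using (PySem.Set.mem_ofList _ _).mpr hmem)]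
      by_cases hp2 : l.dropLast.getLast? = some n
      · -- at least third occurrence: nothing changes
        have hmem2 : n ∈ l.dropLast := by
          have hne2 : l.dropLast ≠ [] := by intro h0; rw [h0] at hp2; simp at hp2
          have := List.getLast?_eq_some_getLast (l := l.dropLast) hne2
          rw [this] at hp2
          exact (Option.some.inj hp2) ▸ List.getLast_mem hne2
        have hcnt2 : 2 ≤ l.count n := by
          have hsplit : l.count n = l.dropLast.count n + 1 := by
            conv_lhs => rw [hdecomp]
            rw [List.count_append]
            simp
          have h1 : 0 < l.dropLast.count n := List.count_pos_iff.mpr hmem2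
          omega
        simp only [pvStepB]
        rw [if_neg (by simp [hprev]), if_neg (by simp [hp2])]
        rw [hglast, hdrop, hset, hprev]
        refine congrArg (fun z => (((PySem.Set.ofList l).length : Int), z, some n, some n)) ?_
        apply List.filter_congr
        intro k hk
        by_cases hkn : k = n
        · subst hkn
          simp only [List.count_append, List.count_singleton, decide_eq_decide]
          omega
        · simp only [List.count_append, List.count_singleton, decide_eq_decide]
          have : ¬ (n = k) := fun hh => hkn hh.symm
          simp [this]
      · -- exactly the second occurrence: n is appended to dupes
        have hcnt1 : l.count n = 1 := by
          have h1 : 1 ≤ l.count n := List.count_pos_iff.mpr hmem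
          by_contra hc
          have h2 : 2 ≤ l.count n := by omega
          -- then n would also occur in l.dropLast, forcing hp2
          have : 0 < l.dropLast.count n := by
            have hcc : l.count n = l.dropLast.count n + 1 := by
              conv_lhs => rw [hdecomp]
              rw [List.count_append]
              simp
            omega
          have hmem2 : n ∈ l.dropLast := List.count_pos_iff.mp this
          have hdl : l.dropLast.Pairwise (· ≤ ·) := hl.sublist (List.dropLast_sublist l)
          have hne2 : l.dropLast ≠ [] := by intro h0; rw [h0] at hmem2; simp at hmem2
          have hm := List.getLast?_eq_some_getLast (l := l.dropLast) hne2
          set m := l.dropLast.getLast hne2 with hmdef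
          have hub : ∀ x ∈ l.dropLast, x ≤ m := pairwise_le_getLast _ hdl m hm
          have hmmem : m ∈ l := (List.dropLast_sublist l).mem (List.getLast_mem hne2)
          have : m = n := le_antisymm (hle m hmmem) (hub n hmem2)
          exact hp2 (by rw [hm, this])
        simp only [pvStepB]
        rw [if_neg (by simp [hprev]), if_pos (by exact fun hh => hp2 hh.symm)]
        rw [hglast, hdrop, hset, hprev]
        -- filter over the set: n moves into the duplicates, at the end
        obtain ⟨S', hS', hnS'⟩ := lt_sorted_ends (PySem.Set.ofList l) (ofList_pairwise_lt l hl) n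
          ((PySem.Set.mem_ofList _ _).mpr hmem)
          (fun x hx => hle x ((PySem.Set.mem_ofList _ _).mp hx))
        refine congrArg (fun z => (((PySem.Set.ofList l).length : Int), z, some n, some n)) ?_
        rw [hS', List.filter_append, List.filter_append]
        have hfn_old : List.filter (fun k => decide (2 ≤ l.count k)) [n] = [] := by
          simp [hcnt1]
        have hfn_new : List.filter (fun k => decide (2 ≤ (l ++ [n]).count k)) [n] = [n] := by
          simp [List.count_append, hcnt1]
        rw [hfn_old, hfn_new, List.append_nil]
        refine congrArg (fun z => z ++ [n]) ?_
        apply List.filter_congr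
        intro k hk
        have hkn : ¬ (n = k) := fun hh => hnS' (hh ▸ hk)
        simp only [List.count_append, List.count_singleton, decide_eq_decide]
        simp [hkn]
    · -- a new, strictly larger element: distinct += 1, counts of old keys unchanged
      have hnot : n ∉ l := by
        intro hmem
        have hne : l ≠ [] := by intro h0; subst h0; simp at hmem
        have hm := List.getLast?_eq_some_getLast (l := l) hne
        set m := l.getLast hne with hmdef
        have hub : ∀ x ∈ l, x ≤ m := pairwise_le_getLast _ hl m hm
        have : m = n := le_antisymm (hle m (List.getLast_mem hne)) (hub n hmem)
        exact hprev (by rw [hm, this])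
      have hcnt0 : l.count n = 0 := List.count_eq_zero.mpr hnot
      have hset : PySem.Set.ofList (l ++ [n]) = PySem.Set.ofList l ++ [n] := by
        rw [PySem.Set.ofList_append_singleton]
        unfold PySem.Set.add
        rw [if_neg (by simpa [PySem.Set.contains_iff] using
          (fun hc => hnot ((PySem.Set.mem_ofList _ _).mp hc) : ¬ n ∈ PySem.Set.ofList l))]
      simp only [pvStepB]
      rw [if_pos (by exact fun hh => hprev hh.symm)]
      rw [hglast, hdrop, hset]
      have hlen : ((PySem.Set.ofList l ++ [n]).length : Int) = ((PySem.Set.ofList l).length : Int) + 1 := by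
        simp
      rw [hlen]
      refine congrArg (fun z => (((PySem.Set.ofList l).length : Int) + 1, z, some n, l.getLast?)) ?_
      rw [List.filter_append]
      have hfn : List.filter (fun k => decide (2 ≤ (l ++ [n]).count k)) [n] = [] := by
        simp [List.count_append, hcnt0]
      rw [hfn, List.append_nil]
      apply List.filter_congr
      intro k hk
      have hkn : ¬ (n = k) := fun hh => hnot (hh ▸ (PySem.Set.mem_ofList _ _).mp hk)
      simp only [List.count_append, List.count_singleton, decide_eq_decide]
      simp [hkn]

-- ===== VERDICT (by name: the statement is the Claim_ definition above) =====
theorem check_duplicate_companies_spec : Claim_equal_check_duplicate_companies := by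
  intro target_rows _
  unfold Spec_check_duplicate_companies check_duplicate_companies check_duplicate_companies_alt
  simp only [afold_eq_names]
  set names := (target_rows.map pvNorm).filter (fun n => n ≠ "") with hn
  set s := PySem.List.sorted names (fun x => x) false with hs
  have hperm : s.Perm names := PySem.List.sorted_perm names (fun x => x) false
  have hpair : s.Pairwise (· ≤ ·) := PySem.List.sorted_pairwise names (fun x => x)
  have hscan := scanB_inv s hpair
  -- show: the B-side fold lambda is pvStepB
  have hfoldB : s.foldl
      (fun (st : Int × List String × Option String × Option String) n =>
        if some n ≠ st.2.2.1 then (st.1 + 1, st.2.1, some n, st.2.2.1)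
        else if some n ≠ st.2.2.2 then (st.1, st.2.1 ++ [n], some n, st.2.2.1)
        else (st.1, st.2.1, some n, st.2.2.1))
      (0, [], none, none)
      = (((PySem.Set.ofList s).length : Int),
         (PySem.Set.ofList s).filter (fun k => decide (2 ≤ s.count k)),
         s.getLast?, s.dropLast.getLast?) := hscan
  rw [hfoldB]
  -- bridge the two filtered sets
  have hcount : ∀ k, s.count k = names.count k := fun k => hperm.count_eq k
  have hsetperm : (PySem.Set.ofList s).Perm (PySem.Set.ofList names) := by
    rw [List.perm_ext_iff_of_nodup (PySem.Set.nodup_ofList _) (PySem.Set.nodup_ofList _)]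
    intro x
    rw [PySem.Set.mem_ofList, PySem.Set.mem_ofList]
    exact hperm.mem_iff
  have hFs_eq : (PySem.Set.ofList s).filter (fun k => decide (2 ≤ s.count k))
      = (PySem.Set.ofList s).filter (fun k => decide (2 ≤ names.count k)) := by
    apply List.filter_congr; intro k _; simp [hcount k]
  set F := (PySem.Set.ofList names).filter (fun k => decide (2 ≤ names.count k)) with hF
  have hFperm : ((PySem.Set.ofList s).filter (fun k => decide (2 ≤ s.count k))).Perm F := by
    rw [hFs_eq]; exact hsetperm.filter _
  have hFpair : ((PySem.Set.ofList s).filter (fun k => decide (2 ≤ s.count k))).Pairwise (· ≤ ·) :=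
    ((ofList_pairwise_lt s hpair).filter _).imp le_of_lt
  -- A side: its duplicate set is a permutation of F as well
  have hAperm := dupes_perm names
  have hAsorted : PySem.List.sorted (PySem.Set.ofList (names.foldl pvStepA (PySem.Dict.empty, [])).2) (fun x => x) false
      = (PySem.Set.ofList s).filter (fun k => decide (2 ≤ s.count k)) :=
    PySem.List.sorted_id_eq_of_perm_of_pairwise _ _ (hFperm.trans hAperm.symm) hFpair
  have hAlen : (PySem.Set.ofList (names.foldl pvStepA (PySem.Dict.empty, [])).2).length
      = ((PySem.Set.ofList s).filter (fun k => decide (2 ≤ s.count k))).length :=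
    (hAperm.trans hFperm.symm).length_eq
  have hnil : (PySem.Set.ofList (names.foldl pvStepA (PySem.Dict.empty, [])).2 ≠ [])
      ↔ ((PySem.Set.ofList s).filter (fun k => decide (2 ≤ s.count k)) ≠ []) := by
    constructor <;> intro h h'
    · exact h (List.Perm.eq_nil (h' ▸ (hAperm.trans hFperm.symm)))
    · exact h (List.Perm.eq_nil (h' ▸ (hAperm.trans hFperm.symm).symm))
  -- A's pass branch: seen.size = distinct count
  have hsize : (((names.foldl pvStepA (PySem.Dict.empty, [])).1.size : Int))
      = ((PySem.Set.ofList s).length : Int) := by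
    have h1 := (afold_inv names).1
    rw [h1]
    have : (PySem.Dict.counter names : PySem.Dict String Int).size
        = (PySem.Set.ofList names).length := by
      have hi := PySem.Dict.items_counter (xs := names) (κ := String)
      unfold PySem.Dict.size
      rw [hi, List.length_map]
    rw [this, hsetperm.length_eq]
  simp only [hAsorted, hAlen, hsize]
  split_ifs with ha hb hb
  · rfl
  · exact absurd (hnil.mp ha) hb
  · exact absurd (hnil.mpr hb) ha
  · rfl
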